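-- pv_equiv track=rewrite | github.com/iluvjava/Fucking_LeetCode_ShitLikeThat | HackerRank/problems/Luck Balance/solutionl.py | solution
-- ===== SOURCE A (Python) =====
-- def solution(k, rows):
--     ImportantContests, Unimportantcontests = [], []
--     for R in rows:
--         if R[1] == 1:
--             ImportantContests.append(R[0])
--         else:
--             Unimportantcontests.append(R[0])
--     ImportantContests.sort(reverse=True)
--     LuckyPoints = 0
--     for I in range(min(k, len(ImportantContests))):
--         LuckyPoints += ImportantContests[I]
--     if k < len(ImportantContests):
--         for I in range(k, len(ImportantContests)):
--             LuckyPoints -= ImportantContests[I]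
--     return sum(L for L in Unimportantcontests) + LuckyPoints
-- ===== SOURCE B (Python) =====
-- def solution(k, rows):
--     # quickselect-style partition selection: sum of the j largest of xs, no sorting
--     def topsum(xs, j):
--         if j <= 0:
--             return 0
--         if len(xs) <= j:
--             return sum(xs)
--         p = xs[0]
--         hi = [x for x in xs if x > p]
--         if j <= len(hi):
--             return topsum(hi, j)
--         eq = [x for x in xs if x == p]
--         if j <= len(hi) + len(eq):
--             return sum(hi) + p * (j - len(hi))
--         lo = [x for x in xs if x < p]
--         return sum(hi) + sum(eq) + topsum(lo, j - len(hi) - len(eq))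
--
--     imp = [r[0] for r in rows if r[1] == 1]
--     base = sum(r[0] for r in rows if r[1] != 1) - sum(imp)
--     return base + 2 * topsum(imp, k)
-- ===== Notes on version B (the rewrite author's own statement) =====
-- stated objective: alternative
-- what changed: B never sorts: it computes the sum of the k largest important values by a recursive quickselect-style three-way partition (first element as pivot) and returns unimportant-sum + 2*topsum - important-sum, replacing A's descending sort with two index-range loops.
-- outside the precondition, e.g. on solution(-1, [[5, 1], [3, 1]]): A returns -11, B returns -8
import Mathlib
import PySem

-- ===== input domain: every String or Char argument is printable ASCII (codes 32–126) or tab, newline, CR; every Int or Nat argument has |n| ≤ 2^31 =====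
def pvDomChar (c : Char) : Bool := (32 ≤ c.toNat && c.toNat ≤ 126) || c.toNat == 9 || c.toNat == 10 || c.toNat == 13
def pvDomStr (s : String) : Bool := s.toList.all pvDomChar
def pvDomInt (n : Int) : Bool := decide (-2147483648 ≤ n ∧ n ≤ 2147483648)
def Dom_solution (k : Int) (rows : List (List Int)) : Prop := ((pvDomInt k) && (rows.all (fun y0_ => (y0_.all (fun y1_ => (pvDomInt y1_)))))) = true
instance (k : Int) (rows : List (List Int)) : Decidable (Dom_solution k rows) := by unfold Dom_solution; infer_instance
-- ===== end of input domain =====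

-- B replaces A's descending sort + index-range loops by a quickselect-style three-way
-- partition that sums the k largest important values without sorting.

-- ===== PORT A =====
def solution (k : Int) (rows : List (List Int)) : Int :=
  let p := rows.foldl (fun (p : List Int × List Int) R =>
      if PySem.List.pyGetD R 1 0 == 1 then (p.1 ++ [PySem.List.pyGetD R 0 0], p.2)
      else (p.1, p.2 ++ [PySem.List.pyGetD R 0 0])) ([], [])
  let imps := PySem.List.sorted p.1 (fun x => x) true
  let lp1 : Int := (PySem.List.pyRange 0 (min k (imps.length : Int)) 1).foldl
      (fun acc i => acc + PySem.List.pyGetD imps i 0) 0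
  let lp2 : Int := if k < (imps.length : Int) then
      (PySem.List.pyRange k (imps.length : Int) 1).foldl
        (fun acc i => acc - PySem.List.pyGetD imps i 0) lp1
    else lp1
  p.2.sum + lp2

-- ===== PORT B =====
-- pvTopSum: sum of the j largest elements, by three-way partition on the first element
def pvTopSum (xs : List Int) (j : Int) : Int :=
  if _h0 : j ≤ 0 then 0
  else if _h1 : (xs.length : Int) ≤ j then xs.sum
  else
    let p := PySem.List.pyGetD xs 0 0
    let hi := xs.filter (fun x => p < x)
    if j ≤ (hi.length : Int) then pvTopSum hi j
    else
      let eq := xs.filter (fun x => x == p)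
      if j ≤ (hi.length : Int) + (eq.length : Int) then
        hi.sum + p * (j - hi.length)
      else
        let lo := xs.filter (fun x => x < p)
        hi.sum + eq.sum + pvTopSum lo (j - hi.length - eq.length)
termination_by xs.length
decreasing_by
  all_goals {
    have hne : xs ≠ [] := by
      intro h; rw [h] at _h1; simp at _h1; omega
    have hmem : PySem.List.pyGetD xs 0 0 ∈ xs := by
      obtain ⟨a, t, rfl⟩ := List.exists_cons_of_ne_nil hne
      simp [PySem.List.pyGetD_zero_cons]
    simp only [List.length_unattach]
    refine lt_of_lt_of_eq (List.length_filter_lt_length_iff_exists.mpr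
      ⟨⟨_, hmem⟩, List.mem_attach _ _, ?_⟩) (List.length_attach (l := xs))
    simp }

def solution_alt (k : Int) (rows : List (List Int)) : Int :=
  let imp := (rows.filter (fun r => PySem.List.pyGetD r 1 0 == 1)).map
      (fun r => PySem.List.pyGetD r 0 0)
  let base := ((rows.filter (fun r => !(PySem.List.pyGetD r 1 0 == 1))).map
      (fun r => PySem.List.pyGetD r 0 0)).sum - imp.sum
  base + 2 * pvTopSum imp k

-- ===== PRECONDITION & SPEC =====
-- Pre_ excludes rows shorter than two entries, on which A raises IndexError, and negative k
-- (outside the problem's natural domain of counts), where A's negative-index wraparound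
-- double-counts important contests.
def Pre_solution (k : Int) (rows : List (List Int)) : Prop :=
  0 ≤ k ∧ ∀ r ∈ rows, 2 ≤ r.length
instance (k : Int) (rows : List (List Int)) : Decidable (Pre_solution k rows) := by
  unfold Pre_solution; infer_instance

def pvWitness_solution : Int × List (List Int) := (2, [[5, 1], [3, 1], [1, 1], [4, 0]])

def Spec_solution (k : Int) (rows : List (List Int)) (out : Int) : Prop := out = solution_alt k rows
instance (k : Int) (rows : List (List Int)) (out : Int) : Decidable (Spec_solution k rows out) := by unfold Spec_solution; infer_instance

-- ===== CLAIM =====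
def Claim_equal_solution : Prop := ∀ (k : Int) (rows : List (List Int)), Dom_solution k rows → Pre_solution k rows → Spec_solution k rows (solution k rows)

-- ===== LEMMAS AND PROOFS =====

-- pivot-partition facts used by pvTopSum_eq
lemma pvFilterLt {q : Int → Bool} {p : Int} {xs : List Int} (hx : p ∈ xs) (hq : q p = false) :
    (xs.filter q).length < xs.length :=
  List.length_filter_lt_length_iff_exists.mpr ⟨p, hx, by simp [hq]⟩
lemma pvHeadMem {xs : List Int} (h : xs ≠ []) : PySem.List.pyGetD xs 0 0 ∈ xs := by
  cases xs with
  | nil => exact absurd rfl h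
  | cons a t => simp [PySem.List.pyGetD_zero_cons]

-- the important / unimportant luck values, in row order (exactly B's two comprehensions)
def pvImp (rows : List (List Int)) : List Int :=
  (rows.filter (fun r => PySem.List.pyGetD r 1 0 == 1)).map (fun r => PySem.List.pyGetD r 0 0)
def pvUnimp (rows : List (List Int)) : List Int :=
  (rows.filter (fun r => !(PySem.List.pyGetD r 1 0 == 1))).map (fun r => PySem.List.pyGetD r 0 0)

lemma pvAfold (rows : List (List Int)) : ∀ (a b : List Int),
    rows.foldl (fun (p : List Int × List Int) R =>
      if PySem.List.pyGetD R 1 0 == 1 then (p.1 ++ [PySem.List.pyGetD R 0 0], p.2)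
      else (p.1, p.2 ++ [PySem.List.pyGetD R 0 0])) (a, b)
    = (a ++ pvImp rows, b ++ pvUnimp rows) := by
  induction rows with
  | nil => intro a b; simp [pvImp, pvUnimp]
  | cons r t ih =>
    intro a b
    simp only [List.foldl_cons, beq_iff_eq] at ih ⊢
    by_cases h : PySem.List.pyGetD r 1 0 = 1
    · rw [if_pos h, ih]; simp [pvImp, pvUnimp, h]
    · rw [if_neg h, ih]; simp [pvImp, pvUnimp, h]

-- three-way partition by the pivot is a permutation of the list
lemma pvPartitionPerm (p : Int) (xs : List Int) :
    (xs.filter (fun x => p < x) ++ xs.filter (fun x => x == p) ++ xs.filter (fun x => x < p)).Perm xs := by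
  induction xs with
  | nil => simp
  | cons a t ih =>
    by_cases h1 : p < a
    · have e2 : (a == p) = false := by simp; omega
      have e3 : decide (a < p) = false := by simp; omega
      simp only [List.filter_cons, decide_true, h1, e2, e3]
      exact ih.cons a
    · by_cases h2 : a = p
      · subst h2
        have e1 : decide (a < a) = false := by simp
        simp only [List.filter_cons, e1, beq_self_eq_true, Bool.false_eq_true, if_true, if_false]
        refine List.Perm.trans ?_ (ih.cons a)
        have : t.filter (fun x => a < x) ++ a :: t.filter (fun x => x == a) ++ t.filter (fun x => x < a)
            = t.filter (fun x => a < x) ++ a :: (t.filter (fun x => x == a) ++ t.filter (fun x => x < a)) := by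
          simp
        rw [this]
        exact List.perm_middle.trans (by simp [List.append_assoc])
      · have h3 : a < p := by omega
        have e1 : decide (p < a) = false := by simp; omega
        have e2 : (a == p) = false := by simp [h2]
        simp only [List.filter_cons, e1, e2, decide_true, h3]
        exact List.perm_middle.trans (by simpa using ih.cons a)

lemma pvPW_eq (p : Int) (xs : List Int) {x : Int} (hx : x ∈ xs.filter (fun x => x == p)) : x = p := by
  have := (List.mem_filter.mp hx).2; simpa using this
lemma pvPW_hi (p : Int) (xs : List Int) {x : Int}
    (hx : x ∈ PySem.List.sorted (xs.filter (fun x => p < x)) (fun x => x) true) : p < x := by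
  have h := (PySem.List.sorted_perm _ (fun x => x) true).mem_iff.mp hx
  have := (List.mem_filter.mp h).2; simpa using this
lemma pvPW_lo (p : Int) (xs : List Int) {x : Int}
    (hx : x ∈ PySem.List.sorted (xs.filter (fun x => x < p)) (fun x => x) true) : x < p := by
  have h := (PySem.List.sorted_perm _ (fun x => x) true).mem_iff.mp hx
  have := (List.mem_filter.mp h).2; simpa using this

-- descending sort splits along the pivot partition
lemma pvSortedSplit (p : Int) (xs : List Int)
    (hperm : (xs.filter (fun x => p < x) ++ xs.filter (fun x => x == p) ++ xs.filter (fun x => x < p)).Perm xs) :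
    PySem.List.sorted xs (fun x => x) true
      = PySem.List.sorted (xs.filter (fun x => p < x)) (fun x => x) true
        ++ xs.filter (fun x => x == p)
        ++ PySem.List.sorted (xs.filter (fun x => x < p)) (fun x => x) true := by
  apply List.Perm.eq_of_pairwise (le := fun a b : Int => b ≤ a)
  · intro a b _ _ h1 h2; omega
  · exact PySem.List.sorted_pairwise_rev xs (fun x => x)
  · rw [List.pairwise_append]
    refine ⟨?_, PySem.List.sorted_pairwise_rev _ _, ?_⟩
    · rw [List.pairwise_append]
      refine ⟨PySem.List.sorted_pairwise_rev _ _, ?_, ?_⟩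
      · exact List.pairwise_of_forall_mem_list (fun a ha b hb => by
          rw [pvPW_eq p xs ha, pvPW_eq p xs hb])
      · intro a ha b hb
        have h1 := pvPW_hi p xs ha
        have h2 := pvPW_eq p xs hb
        omega
    · intro a ha b hb
      have h2 := pvPW_lo p xs hb
      rcases List.mem_append.mp ha with h | h
      · have := pvPW_hi p xs h; omega
      · have := pvPW_eq p xs h; omega
  · exact List.Perm.symm
      (((((PySem.List.sorted_perm _ (fun x => x) true).append_right _).append
        (PySem.List.sorted_perm _ (fun x => x) true)).trans hperm).trans
        (PySem.List.sorted_perm xs (fun x => x) true).symm)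

-- all elements of the pivot's equality class are the pivot
lemma pvEqFilter (p : Int) (xs : List Int) :
    xs.filter (fun x => x == p) = List.replicate (xs.filter (fun x => x == p)).length p := by
  apply List.eq_replicate_of_mem
  intro b hb
  have := (List.mem_filter.mp hb).2
  simpa using this

-- quickselect topsum = sum of the first j entries of the descending sort
lemma pvTopSum_eq : ∀ (n : Nat) (xs : List Int), xs.length ≤ n → ∀ (j : Int),
    pvTopSum xs j = ((PySem.List.sorted xs (fun x => x) true).take j.toNat).sum := by
  intro n
  induction n with
  | zero =>
    intro xs hlen j
    have hx : xs = [] := List.length_eq_zero_iff.mp (by omega)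
    subst hx
    rw [pvTopSum]
    split_ifs <;> simp_all [PySem.List.sorted] <;> omega
  | succ n ih =>
    intro xs hlen j
    rw [pvTopSum]
    set D := PySem.List.sorted xs (fun x => x) true with hDdef
    have hDlen : D.length = xs.length := PySem.List.length_sorted _ _ _
    have hDsum : D.sum = xs.sum := (PySem.List.sorted_perm _ _ _).sum_eq
    by_cases h0 : j ≤ 0
    · rw [dif_pos h0]
      have : j.toNat = 0 := by omega
      simp [this]
    rw [dif_neg h0]
    by_cases h1 : (xs.length : Int) ≤ j
    · rw [dif_pos h1]
      rw [List.take_of_length_le (by omega), hDsum]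
    rw [dif_neg h1]
    simp only []
    have hne : xs ≠ [] := by intro h; rw [h] at h1; simp at h1; omega
    set p := PySem.List.pyGetD xs 0 0 with hp
    set hi := xs.filter (fun x => p < x) with hhi
    set eq := xs.filter (fun x => x == p) with heq
    set lo := xs.filter (fun x => x < p) with hlo
    have hhilt : hi.length < xs.length := pvFilterLt (pvHeadMem hne) (by simp [hp])
    have hlolt : lo.length < xs.length := pvFilterLt (pvHeadMem hne) (by simp [hp])
    have hsplit : D = PySem.List.sorted hi (fun x => x) true ++ eq
        ++ PySem.List.sorted lo (fun x => x) true :=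
      pvSortedSplit p xs (pvPartitionPerm p xs)
    set Dhi := PySem.List.sorted hi (fun x => x) true with hDhi
    set Dlo := PySem.List.sorted lo (fun x => x) true with hDlo
    have hDhilen : Dhi.length = hi.length := PySem.List.length_sorted _ _ _
    have hDlolen : Dlo.length = lo.length := PySem.List.length_sorted _ _ _
    have hDhisum : Dhi.sum = hi.sum := (PySem.List.sorted_perm _ _ _).sum_eq
    by_cases h2 : j ≤ (hi.length : Int)
    · rw [if_pos h2, ih hi (by omega) j, hsplit]
      rw [List.take_append_of_le_length (by simp; omega),
        List.take_append_of_le_length (by omega)]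
    rw [if_neg h2]
    by_cases h3 : j ≤ (hi.length : Int) + (eq.length : Int)
    · rw [if_pos h3, hsplit]
      rw [List.take_append_of_le_length (by simp; omega)]
      rw [List.take_append, List.take_of_length_le (by omega),
        List.sum_append, hDhisum]
      have hrep := pvEqFilter p xs
      rw [← heq] at hrep
      rw [hrep, List.take_replicate, List.sum_replicate, nsmul_eq_mul]
      have hmin : ((min (j.toNat - Dhi.length) eq.length : Nat) : Int) = j - (hi.length : Int) := by
        omega
      rw [hmin]
      ring
    rw [if_neg h3, hsplit]
    rw [List.take_append, List.take_of_length_le (by simp; omega)]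
    rw [ih lo (by omega) (j - hi.length - eq.length)]
    have : (j - (hi.length : Int) - eq.length).toNat = j.toNat - (Dhi ++ eq).length := by
      simp only [List.length_append, hDhilen]
      omega
    rw [this]
    simp only [List.sum_append, hDhisum]
    ring

-- A's first loop sums the first t entries
lemma pvLoop1 (xs : List Int) : ∀ (t : Nat), t ≤ xs.length → ∀ (s : Int),
    (PySem.List.pyRange 0 (t : Int) 1).foldl (fun acc i => acc + PySem.List.pyGetD xs i 0) s
    = s + (xs.take t).sum := by
  intro t
  induction t with
  | zero => intro _ s; simp [PySem.List.pyRange_one_eq_nil]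
  | succ t ih =>
    intro ht s
    have hlt : t < xs.length := by omega
    have h0 : ((t : Int) + 1) = ((t + 1 : Nat) : Int) := by push_cast; ring
    rw [← h0, PySem.List.pyRange_one_succ_right (by positivity), List.foldl_append,
      ih (by omega) s]
    simp only [List.foldl_cons, List.foldl_nil, PySem.List.pyGetD_natCast]
    rw [List.take_add_one, List.getElem?_eq_getElem hlt]
    simp only [List.sum_append, Option.toList_some, List.sum_cons, List.sum_nil,
      List.getD_eq_getElem?_getD, List.getElem?_eq_getElem hlt, Option.getD_some]
    ring

lemma pvFoldlSub (l : List Int) : ∀ (s : Int), l.foldl (fun a x => a - x) s = s - l.sum := by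
  induction l with
  | nil => simp
  | cons x t ih => intro s; simp [ih]; ring

-- A's second loop subtracts the entries from index k on
lemma pvLoop2 (xs : List Int) (k : Int) (hk : 0 ≤ k) (s : Int) :
    (PySem.List.pyRange k (xs.length : Int) 1).foldl
      (fun acc i => acc - PySem.List.pyGetD xs i 0) s
    = s - (xs.drop k.toNat).sum := by
  rw [PySem.List.foldl_pyRange_pyGetD' xs 0 (fun a v => a - v) s hk, pvFoldlSub]

-- ===== VERDICT =====
theorem solution_spec : Claim_equal_solution := by
  intro k rows _ hpre
  obtain ⟨hk, -⟩ := hpre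
  unfold Spec_solution solution solution_alt
  rw [pvAfold rows [] []]
  simp only [List.nil_append]
  show _ = (pvUnimp rows).sum - (pvImp rows).sum + 2 * pvTopSum (pvImp rows) k
  rw [pvTopSum_eq (pvImp rows).length (pvImp rows) le_rfl k]
  set D := PySem.List.sorted (pvImp rows) (fun x => x) true with hD
  have hlen : D.length = (pvImp rows).length := PySem.List.length_sorted _ _ _
  have hsum : D.sum = (pvImp rows).sum := (PySem.List.sorted_perm _ _ _).sum_eq
  have hsplit : (D.take k.toNat).sum + (D.drop k.toNat).sum = D.sum := by
    rw [← List.sum_append, List.take_append_drop]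
  by_cases hcase : k < (D.length : Int)
  · rw [if_pos hcase]
    have hmin : min k (D.length : Int) = ((k.toNat : Nat) : Int) := by omega
    rw [hmin, pvLoop1 D k.toNat (by omega) 0, pvLoop2 D k hk]
    omega
  · rw [if_neg hcase]
    have hmin : min k (D.length : Int) = ((D.length : Nat) : Int) := by omega
    rw [hmin, pvLoop1 D D.length le_rfl 0]
    have htake : D.take k.toNat = D := List.take_of_length_le (by omega)
    rw [htake]
    simp only [List.take_length]
    omega
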